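-- pv_equiv track=rewrite | github.com/ai-in-pm/NemoClawd | apps/NeMo-Agent-Toolkit-develop/packages/nvidia_nat_app/src/nat_app/graph/topology.py | _cycle_path_nodes
-- ===== SOURCE A (Python) =====
-- from collections import deque
--
-- def _cycle_path_nodes(
--     entry: str,
--     exit_node: str,
--     scc: set[str],
--     adj: dict[str, list[str]],
--     rev_adj: dict[str, list[str]],
-- ) -> set[str]:
--     """All nodes on ANY path from *entry* to *exit_node* within *scc*.
--
--     Uses forward-backward reachability: a node is part of the cycle
--     when it is forward-reachable from *entry* AND backward-reachable
--     from *exit_node* (both within the SCC, excluding the back-edge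
--     direction exit→entry).  This correctly captures parallel branches
--     in fan-out/fan-in structures.
--
--     Falls back to the full SCC if no forward path exists.
--     """
--     if entry == exit_node:
--         return {entry}
--
--     is_back_edge = (exit_node, entry)
--
--     # Forward BFS from entry within SCC (excluding the back-edge)
--     fwd: set[str] = set()
--     q: deque[str] = deque([entry])
--     while q:
--         n = q.popleft()
--         if n in fwd:
--             continue
--         fwd.add(n)
--         for nb in adj.get(n, []):
--             if nb in scc and nb not in fwd and (n, nb) != is_back_edge:
--                 q.append(nb)
--
--     if exit_node not in fwd:
--         return set(scc)
--
--     # Backward BFS from exit_node using pre-built rev_adj, scoped to SCC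
--     bwd: set[str] = set()
--     q = deque([exit_node])
--     while q:
--         n = q.popleft()
--         if n in bwd:
--             continue
--         bwd.add(n)
--         for nb in rev_adj.get(n, []):
--             if nb in scc and nb not in bwd and (nb, n) != is_back_edge:
--                 q.append(nb)
--
--     return fwd & bwd
-- ===== SOURCE B (Python) =====
-- def _saturate(start, nbrs, scc, bad):
--     """Round-based fixpoint saturation (no queue, no frontier): each of
--     len(scc)+1 rounds rescans every visited node and adds every admissible
--     neighbour; len(scc)+1 rounds provably reach the fixpoint, the set of
--     nodes reachable from start within scc without crossing the edge bad."""
--     vis = {start}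
--     for _ in range(len(scc) + 1):
--         for n in list(vis):
--             for nb in nbrs.get(n, []):
--                 if nb in scc and nb not in vis and (n, nb) != bad:
--                     vis.add(nb)
--     return vis
--
--
-- def _cycle_path_nodes(
--     entry: str,
--     exit_node: str,
--     scc: set,
--     adj: dict,
--     rev_adj: dict,
-- ) -> set:
--     if entry == exit_node:
--         return {entry}
--
--     fwd = _saturate(entry, adj, scc, (exit_node, entry))
--     if exit_node not in fwd:
--         return set(scc)
--
--     # a rev_adj step n -> nb is the original edge nb -> n, so the excluded
--     # back-edge (exit_node, entry) is the rev step (entry, exit_node)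
--     bwd = _saturate(exit_node, rev_adj, scc, (entry, exit_node))
--     return fwd & bwd
-- ===== Notes on version B (the rewrite author's own statement) =====
-- stated objective: alternative
-- what changed: Replaces A's two worklist BFS traversals (a deque of pending nodes, pop/mark/enqueue) with a queue-free round-based fixpoint saturation: a single helper runs len(scc)+1 full rounds, each rescanning every visited node and adding all admissible neighbours, which provably reaches the same reachable sets.
import Mathlib
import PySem

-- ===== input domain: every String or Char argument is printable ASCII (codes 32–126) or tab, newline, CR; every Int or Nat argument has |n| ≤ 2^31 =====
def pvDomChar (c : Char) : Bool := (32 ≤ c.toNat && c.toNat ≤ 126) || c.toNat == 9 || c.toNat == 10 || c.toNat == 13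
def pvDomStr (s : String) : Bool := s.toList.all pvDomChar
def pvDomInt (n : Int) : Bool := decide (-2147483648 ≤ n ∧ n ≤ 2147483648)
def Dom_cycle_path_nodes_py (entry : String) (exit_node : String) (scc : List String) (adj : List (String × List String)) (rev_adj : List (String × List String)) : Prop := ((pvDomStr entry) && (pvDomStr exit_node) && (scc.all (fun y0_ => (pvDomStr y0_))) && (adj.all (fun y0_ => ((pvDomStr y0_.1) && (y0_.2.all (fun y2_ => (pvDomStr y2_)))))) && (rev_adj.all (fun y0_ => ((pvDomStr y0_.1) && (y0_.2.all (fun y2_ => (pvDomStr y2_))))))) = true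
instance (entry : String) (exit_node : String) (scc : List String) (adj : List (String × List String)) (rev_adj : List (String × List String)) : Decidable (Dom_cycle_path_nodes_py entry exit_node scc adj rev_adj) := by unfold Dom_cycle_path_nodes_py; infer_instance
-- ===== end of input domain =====

-- B replaces A's two worklist (deque) BFS traversals by a queue-free round-based
-- fixpoint saturation over len(scc)+1 rounds (objective: alternative).

-- Termination measure for A's BFS while-loop: distinct pending-or-in-scc strings not yet visited.
def pvMeas (scc vis q : List String) : Nat := ((q ++ scc).toFinset \ vis.toFinset).card

theorem pvMeas_mono (scc vis q q' : List String) (h : ∀ x ∈ q', x ∈ q ∨ x ∈ scc) :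
    pvMeas scc vis q' ≤ pvMeas scc vis q := by
  apply Finset.card_le_card
  intro x hx
  simp only [Finset.mem_sdiff, List.mem_toFinset, List.mem_append] at hx ⊢
  obtain ⟨h1, h2⟩ := hx
  refine ⟨?_, h2⟩
  rcases h1 with h' | h'
  · exact (h x h').imp id id
  · exact Or.inr h'

theorem pvMeas_step (scc fwd t q' : List String) (n : String)
    (hn : n ∉ fwd) (hq' : ∀ x ∈ q', x ∈ t ∨ x ∈ scc) :
    pvMeas scc (fwd ++ [n]) q' < pvMeas scc fwd (n :: t) := by
  apply Finset.card_lt_card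
  constructor
  · intro x hx
    simp only [Finset.mem_sdiff, List.mem_toFinset, List.mem_append, List.mem_cons] at hx ⊢
    refine ⟨?_, fun h => hx.2 (Or.inl h)⟩
    rcases hx.1 with h' | h'
    · rcases hq' x h' with h'' | h'' <;> tauto
    · tauto
  · intro hsub
    have hn' : n ∈ (((n :: t) ++ scc).toFinset \ fwd.toFinset) := by
      simp [Finset.mem_sdiff, hn]
    have := hsub hn'
    simp [Finset.mem_sdiff] at this

theorem pvLex {a b c d : Nat} (h1 : a ≤ b) (h2 : c < d) :
    Prod.Lex (· < ·) (· < ·) (a, c) (b, d) := by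
  rcases lt_or_eq_of_le h1 with h | h
  · exact Prod.Lex.left _ _ h
  · subst h; exact Prod.Lex.right _ h2

-- ===== PORT A =====
-- A's BFS while-loop (one recursion, used for both directions; the edge test P is the
-- only difference between A's two loops). fwd.add(n) happens under the 'n not in fwd'
-- guard, hence fwd ++ [n]; the inner for/if/append is the foldl.
def bfsA (nbrs : PySem.Dict String (List String)) (scc : List String)
    (P : String → String → Bool) (fwd q : List String) : List String :=
  match q with
  | [] => fwd
  | n :: t =>
    if fwd.contains n then bfsA nbrs scc P fwd t
    else
      bfsA nbrs scc P (fwd ++ [n])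
        ((PySem.Dict.getD nbrs n []).foldl
          (fun acc nb =>
            if scc.contains nb && !((fwd ++ [n]).contains nb) && P n nb then acc ++ [nb]
            else acc) t)
  termination_by (pvMeas scc fwd q, q.length)
  decreasing_by
  · exact pvLex (pvMeas_mono scc fwd (n :: t) t (fun x hx => Or.inl (List.mem_cons_of_mem _ hx)))
      (Nat.lt_succ_self _)
  · apply Prod.Lex.left
    apply pvMeas_step scc fwd t _ n (by simp_all)
    intro x hx
    simp only [dite_eq_ite] at hx
    rw [PySem.List.foldl_append_if_eq_filter] at hx
    rcases List.mem_append.1 hx with h | h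
    · exact Or.inl h
    · have := List.of_mem_filter h
      simp only [Bool.and_eq_true] at this
      exact Or.inr (by simpa using this.1.1)

def cycle_path_nodes_py (entry : String) (exit_node : String) (scc : List String) (adj : List (String × List String)) (rev_adj : List (String × List String)) : List String :=
  if entry == exit_node then [entry]
  else
    let fwd := bfsA (PySem.Dict.mk adj) scc (fun n nb => (n, nb) != (exit_node, entry)) [] [entry]
    if !(fwd.contains exit_node) then PySem.Set.ofList scc
    else
      let bwd := bfsA (PySem.Dict.mk rev_adj) scc (fun n nb => (nb, n) != (exit_node, entry)) [] [exit_node]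
      PySem.Set.inter fwd bwd

-- ===== PORT B =====
-- Source B's _saturate: one round = 'for n in list(vis): for nb in nbrs.get(n, []): …'
-- (the snapshot list(vis) is the outer foldl's list; vis.add(nb) is PySem.Set.add):
def satRound (nbrs : PySem.Dict String (List String)) (scc : List String)
    (P : String → String → Bool) (vis : List String) : List String :=
  vis.foldl (fun v n =>
    (PySem.Dict.getD nbrs n []).foldl (fun v nb =>
      if scc.contains nb && !(List.contains v nb) && P n nb then PySem.Set.add v nb else v) v) vis

-- Source B's 'for _ in range(len(scc) + 1)' loop over rounds:
def saturate (nbrs : PySem.Dict String (List String)) (scc : List String)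
    (P : String → String → Bool) (start : String) : List String :=
  (PySem.List.pyRange 0 (PySem.List.len scc + 1) 1).foldl
    (fun vis _ => satRound nbrs scc P vis) [start]

def cycle_path_nodes_py_alt (entry : String) (exit_node : String) (scc : List String) (adj : List (String × List String)) (rev_adj : List (String × List String)) : List String :=
  if entry == exit_node then [entry]
  else
    let fwd := saturate (PySem.Dict.mk adj) scc (fun n nb => (n, nb) != (exit_node, entry)) entry
    if !(fwd.contains exit_node) then PySem.Set.ofList scc
    else
      let bwd := saturate (PySem.Dict.mk rev_adj) scc (fun n nb => (n, nb) != (entry, exit_node)) exit_node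
      PySem.Set.inter fwd bwd

-- ===== PRECONDITION & SPEC =====
def Spec_cycle_path_nodes_py (entry : String) (exit_node : String) (scc : List String) (adj : List (String × List String)) (rev_adj : List (String × List String)) (out : List String) : Prop := out = cycle_path_nodes_py_alt entry exit_node scc adj rev_adj
instance (entry : String) (exit_node : String) (scc : List String) (adj : List (String × List String)) (rev_adj : List (String × List String)) (out : List String) : Decidable (Spec_cycle_path_nodes_py entry exit_node scc adj rev_adj out) := by unfold Spec_cycle_path_nodes_py; infer_instance

-- ===== CLAIM (what is proved, stated in full; the proofs are below) =====
def Claim_equal_cycle_path_nodes_py : Prop := ∀ (entry : String) (exit_node : String) (scc : List String) (adj : List (String × List String)) (rev_adj : List (String × List String)), Dom_cycle_path_nodes_py entry exit_node scc adj rev_adj → Spec_cycle_path_nodes_py entry exit_node scc adj rev_adj (cycle_path_nodes_py entry exit_node scc adj rev_adj)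

-- ===== LEMMAS AND PROOFS =====

-- Proof-side intermediate traversals: reachInner (one node's admissible pushes, threading
-- (vis, nxt)), reachStep (one layer), reachLoop (frontier BFS), bfsC (dedup-at-enqueue
-- queue BFS). A's bfsA is reconciled with reachLoop, and B's saturate with reachLoop.
def reachInner (scc : List String) (P : String → String → Bool) (n : String)
    (vis nxt : List String) : List String → List String × List String
  | [] => (vis, nxt)
  | nb :: rest =>
    if scc.contains nb && !vis.contains nb && P n nb then
      reachInner scc P n (vis ++ [nb]) (nxt ++ [nb]) rest
    else reachInner scc P n vis nxt rest

def reachStep (nbrs : PySem.Dict String (List String)) (scc : List String)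
    (P : String → String → Bool) (vis nxt : List String) : List String → List String × List String
  | [] => (vis, nxt)
  | n :: f =>
    let p := reachInner scc P n vis nxt (PySem.Dict.getD nbrs n [])
    reachStep nbrs scc P p.1 p.2 f

theorem reachInner_exists (scc : List String) (P : String → String → Bool) (n : String) :
    ∀ (xs vis : List String), ∃ d : List String,
      (∀ nxt, reachInner scc P n vis nxt xs = (vis ++ d, nxt ++ d)) ∧
      ∀ x ∈ d, x ∈ scc ∧ x ∉ vis := by
  intro xs
  induction xs with
  | nil => intro vis; exact ⟨[], fun nxt => by simp [reachInner], by simp⟩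
  | cons nb rest ih =>
    intro vis
    by_cases h : (scc.contains nb && !vis.contains nb && P n nb) = true
    · obtain ⟨d, hfun, hprop⟩ := ih (vis ++ [nb])
      refine ⟨nb :: d, fun nxt => ?_, ?_⟩
      · simp only [reachInner, h, if_pos]
        rw [hfun (nxt ++ [nb])]
        simp
      · intro x hx
        rcases List.mem_cons.1 hx with h' | h'
        · subst h'
          simp only [Bool.and_eq_true, Bool.not_eq_true'] at h
          exact ⟨by simpa using h.1.1, by simpa using h.1.2⟩
        · have := hprop x h'
          exact ⟨this.1, fun hv => this.2 (List.mem_append.2 (Or.inl hv))⟩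
    · obtain ⟨d, hfun, hprop⟩ := ih vis
      refine ⟨d, fun nxt => ?_, hprop⟩
      rw [reachInner, if_neg h]
      exact hfun nxt

theorem reachStep_exists (nbrs : PySem.Dict String (List String)) (scc : List String)
    (P : String → String → Bool) :
    ∀ (f vis : List String), ∃ d : List String,
      (∀ nxt, reachStep nbrs scc P vis nxt f = (vis ++ d, nxt ++ d)) ∧
      ∀ x ∈ d, x ∈ scc ∧ x ∉ vis := by
  intro f
  induction f with
  | nil => intro vis; exact ⟨[], fun nxt => by simp [reachStep], by simp⟩
  | cons n f ih =>
    intro vis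
    obtain ⟨d1, hfun1, hprop1⟩ := reachInner_exists scc P n (PySem.Dict.getD nbrs n []) vis
    obtain ⟨d2, hfun2, hprop2⟩ := ih (vis ++ d1)
    refine ⟨d1 ++ d2, fun nxt => ?_, ?_⟩
    · simp only [reachStep, hfun1 nxt]
      rw [hfun2 (nxt ++ d1)]
      simp
    · intro x hx
      rcases List.mem_append.1 hx with h' | h'
      · exact hprop1 x h'
      · have := hprop2 x h'
        exact ⟨this.1, fun hv => this.2 (List.mem_append.2 (Or.inl hv))⟩

theorem pvMeas_append_lt (scc vis q t d : List String) (x : String)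
    (hd : ∀ y ∈ x :: d, y ∈ scc ∧ y ∉ vis) (ht : ∀ y ∈ t, y ∈ q ∨ y ∈ scc) :
    pvMeas scc (vis ++ x :: d) (t ++ x :: d) < pvMeas scc vis q := by
  apply Finset.card_lt_card
  constructor
  · intro y hy
    simp only [Finset.mem_sdiff, List.mem_toFinset, List.mem_append, List.mem_cons] at hy ⊢
    have hy2 : y ∉ vis ∧ ¬(y = x ∨ y ∈ d) := by tauto
    refine ⟨?_, hy2.1⟩
    rcases hy.1 with (h' | h') | h'
    · rcases ht y h' with h'' | h'' <;> tauto
    · exact Or.inr (hd y (by simpa using h')).1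
    · tauto
  · intro hsub
    have hx : x ∈ ((q ++ scc).toFinset \ vis.toFinset) := by
      have := hd x (List.mem_cons_self)
      simp only [Finset.mem_sdiff, List.mem_toFinset, List.mem_append]
      exact ⟨Or.inr this.1, this.2⟩
    have := hsub hx
    simp [Finset.mem_sdiff] at this

def reachLoop (nbrs : PySem.Dict String (List String)) (scc : List String)
    (P : String → String → Bool) (vis frontier : List String) : List String :=
  match frontier with
  | [] => vis
  | n :: f =>
    let p := reachStep nbrs scc P vis [] (n :: f)
    reachLoop nbrs scc P p.1 p.2
  termination_by (pvMeas scc vis frontier, frontier.length)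
  decreasing_by
    obtain ⟨d, hfun, hprop⟩ := reachStep_exists nbrs scc P (n :: f) vis
    rw [hfun []]
    cases d with
    | nil =>
      simp only [List.append_nil]
      exact pvLex (pvMeas_mono scc vis (n :: f) [] (by simp)) (by simp)
    | cons x d =>
      apply Prod.Lex.left
      simpa using pvMeas_append_lt scc vis (n :: f) [] d x hprop (by simp)

-- Ordered first-occurrence dedup relative to an already-seen list.
def fresh (S : List String) : List String → List String
  | [] => []
  | x :: xs => if S.contains x then fresh S xs else x :: fresh (S ++ [x]) xs

theorem fresh_append (a : List String) : ∀ (S b : List String),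
    fresh S (a ++ b) = fresh S a ++ fresh (S ++ fresh S a) b := by
  induction a with
  | nil => intro S b; simp [fresh]
  | cons x a ih =>
    intro S b
    by_cases h : S.contains x = true
    · simp only [List.cons_append, fresh, h, if_pos]
      exact ih S b
    · simp only [List.cons_append, fresh, h, if_neg, Bool.false_eq_true, not_false_iff]
      rw [ih (S ++ [x]) b]
      simp

def bfsC (nbrs : PySem.Dict String (List String)) (scc : List String)
    (P : String → String → Bool) (vis q : List String) : List String :=
  match q with
  | [] => vis
  | n :: t =>
    let p := reachInner scc P n vis t (PySem.Dict.getD nbrs n [])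
    bfsC nbrs scc P p.1 p.2
  termination_by (pvMeas scc vis q, q.length)
  decreasing_by
    obtain ⟨d, hfun, hprop⟩ := reachInner_exists scc P n (PySem.Dict.getD nbrs n []) vis
    rw [hfun t]
    cases d with
    | nil =>
      simp only [List.append_nil]
      exact pvLex (pvMeas_mono scc vis (n :: t) t
        (fun x hx => Or.inl (List.mem_cons_of_mem _ hx))) (by simp)
    | cons x d =>
      apply Prod.Lex.left
      exact pvMeas_append_lt scc vis (n :: t) t d x hprop
        (fun y hy => Or.inl (List.mem_cons_of_mem _ hy))

theorem bfsC_nil (nbrs : PySem.Dict String (List String)) (scc : List String)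
    (P : String → String → Bool) (vis : List String) :
    bfsC nbrs scc P vis [] = vis := by
  rw [bfsC.eq_def]

theorem bfsC_cons (nbrs : PySem.Dict String (List String)) (scc : List String)
    (P : String → String → Bool) (vis : List String) (n : String) (t : List String) :
    bfsC nbrs scc P vis (n :: t) =
      bfsC nbrs scc P (reachInner scc P n vis t (PySem.Dict.getD nbrs n [])).1
        (reachInner scc P n vis t (PySem.Dict.getD nbrs n [])).2 := by
  rw [bfsC.eq_def]

-- A's inner push-filter, replayed through 'fresh': the dedup of A's pushes equals
-- the dedup-at-enqueue traversal's additions.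
theorem reachInner_eq_fresh (scc : List String) (P : String → String → Bool)
    (n : String) (F : List String) :
    ∀ (xs vis nxt : List String), (∀ y ∈ F, y ∈ vis) →
      reachInner scc P n vis nxt xs =
        (vis ++ fresh vis (xs.filter (fun nb => scc.contains nb && !F.contains nb && P n nb)),
         nxt ++ fresh vis (xs.filter (fun nb => scc.contains nb && !F.contains nb && P n nb))) := by
  intro xs
  induction xs with
  | nil => intro vis nxt _; simp [reachInner, fresh]
  | cons nb rest ih =>
    intro vis nxt hF
    by_cases hs : scc.contains nb = true
    · by_cases hP : P n nb = true
      · by_cases hv : vis.contains nb = true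
        · have hFc : (!F.contains nb) = true ∨ (!F.contains nb) = false := by
            cases (F.contains nb) <;> simp
          simp only [reachInner, hs, hv, hP, Bool.not_true, Bool.and_false, Bool.and_true,
            if_neg, Bool.false_eq_true, not_false_iff]
          rcases hFc with hFc | hFc
          · rw [List.filter_cons_of_pos (by simp only [Bool.and_eq_true]; exact ⟨⟨hs, hFc⟩, hP⟩), fresh, if_pos hv]
            exact ih vis nxt hF
          · rw [List.filter_cons_of_neg (by
              intro hmem
              simp only [Bool.and_eq_true] at hmem
              rw [hFc] at hmem
              exact absurd hmem.1.2 (by simp))]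
            exact ih vis nxt hF
        · have hFc : F.contains nb = false := by
            cases hc : F.contains nb
            · rfl
            · exact absurd (by simpa using hF nb (by simpa using hc)) (by simpa using hv)
          simp only [reachInner, hs, hv, hP, Bool.not_false, Bool.and_self,
            if_pos]
          rw [List.filter_cons_of_pos (by simp only [Bool.and_eq_true]; exact ⟨⟨hs, by simpa using hFc⟩, hP⟩), fresh, if_neg hv]
          rw [ih (vis ++ [nb]) (nxt ++ [nb]) (fun y hy => List.mem_append.2 (Or.inl (hF y hy)))]
          simp
      · simp only [reachInner, hs, hP, Bool.and_false, if_neg, Bool.false_eq_true,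
          not_false_iff]
        rw [List.filter_cons_of_neg (by simp [hP])]
        exact ih vis nxt hF
    · simp only [reachInner, hs, Bool.false_and, if_neg, Bool.false_eq_true, not_false_iff]
      rw [List.filter_cons_of_neg (by
        intro hmem
        simp only [Bool.and_eq_true] at hmem
        exact hs hmem.1.1)]
      exact ih vis nxt hF

theorem bfsA_eq_bfsC (nbrs : PySem.Dict String (List String)) (scc : List String)
    (P : String → String → Bool) :
    ∀ (fwd q : List String),
      bfsA nbrs scc P fwd q = bfsC nbrs scc P (fwd ++ fresh fwd q) (fresh fwd q) := by
  intro fwd q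
  induction fwd, q using bfsA.induct nbrs scc P with
  | case1 fwd => simp [bfsA, bfsC, fresh]
  | case2 fwd n t h ih =>
    rw [bfsA, if_pos h]
    rw [ih]
    simp only [fresh, h, if_pos]
  | case3 fwd n t h ih =>
    rw [bfsA, if_neg h]
    have hn : fwd.contains n = false := by
      cases hc : fwd.contains n
      · rfl
      · exact absurd hc h
    simp only [dite_eq_ite] at ih ⊢
    rw [PySem.List.foldl_append_if_eq_filter] at ih ⊢
    rw [ih]
    have hn' : n ∉ fwd := by simpa using hn
    have hfr : fresh fwd (n :: t) = n :: fresh (fwd ++ [n]) t := by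
      simp [fresh, hn']
    rw [hfr, fresh_append]
    have hv : fwd ++ n :: fresh (fwd ++ [n]) t = (fwd ++ [n]) ++ fresh (fwd ++ [n]) t := by
      simp
    rw [hv]
    conv_rhs => rw [bfsC_cons]
    rw [reachInner_eq_fresh scc P n (fwd ++ [n])
      (PySem.Dict.getD nbrs n []) ((fwd ++ [n]) ++ fresh (fwd ++ [n]) t)
      (fresh (fwd ++ [n]) t) (fun y hy => List.mem_append.2 (Or.inl hy))]
    simp [List.append_assoc]

theorem bfsC_split (nbrs : PySem.Dict String (List String)) (scc : List String)
    (P : String → String → Bool) :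
    ∀ (f vis t : List String),
      bfsC nbrs scc P vis (f ++ t) =
        bfsC nbrs scc P (reachStep nbrs scc P vis [] f).1
          (t ++ (reachStep nbrs scc P vis [] f).2) := by
  intro f
  induction f with
  | nil => intro vis t; simp [reachStep]
  | cons n f ih =>
    intro vis t
    obtain ⟨d, hfun, hprop⟩ := reachInner_exists scc P n (PySem.Dict.getD nbrs n []) vis
    obtain ⟨d2, hfun2, hprop2⟩ := reachStep_exists nbrs scc P f (vis ++ d)
    have hL : bfsC nbrs scc P vis ((n :: f) ++ t) =
        bfsC nbrs scc P (vis ++ d) (f ++ (t ++ d)) := by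
      rw [List.cons_append, bfsC_cons, hfun (f ++ t)]
      simp
    rw [hL, ih (vis ++ d) (t ++ d)]
    have hR : reachStep nbrs scc P vis [] (n :: f) =
        ((reachStep nbrs scc P (vis ++ d) [] f).1,
         d ++ (reachStep nbrs scc P (vis ++ d) [] f).2) := by
      simp only [reachStep, hfun []]
      rw [hfun2 ([] ++ d), hfun2 []]
      simp
    rw [hR]
    simp [List.append_assoc]

theorem bfsC_eq_reachLoop (nbrs : PySem.Dict String (List String)) (scc : List String)
    (P : String → String → Bool) :
    ∀ (vis f : List String), bfsC nbrs scc P vis f = reachLoop nbrs scc P vis f := by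
  intro vis f
  induction vis, f using reachLoop.induct nbrs scc P with
  | case1 vis => rw [bfsC_nil, reachLoop.eq_def]
  | case2 vis n f p ih =>
    have hL : reachLoop nbrs scc P vis (n :: f) = reachLoop nbrs scc P p.1 p.2 := by
      conv_lhs => rw [reachLoop.eq_def]
    rw [hL, ← ih]
    have := bfsC_split nbrs scc P (n :: f) vis []
    simpa using this

theorem bwd_pred_eq (entry exit_node : String) :
    (fun n nb => (nb, n) != (exit_node, entry)) = (fun n nb => (n, nb) != (entry, exit_node)) := by
  funext n nb
  by_cases h1 : nb = exit_node <;> by_cases h2 : n = entry <;>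
    simp [h1, h2, bne, Prod.ext_iff]

theorem bfsA_eq_reachLoop (nbrs : PySem.Dict String (List String)) (scc : List String)
    (P : String → String → Bool) (s : String) :
    bfsA nbrs scc P [] [s] = reachLoop nbrs scc P [s] [s] := by
  rw [bfsA_eq_bfsC, ← bfsC_eq_reachLoop]
  simp [fresh]

-- ===== B-side reconciliation: saturation rounds = frontier BFS =====

-- reachInner's vis component is exactly B's inner double loop body.
theorem reachInner_fst (scc : List String) (P : String → String → Bool) (n : String) :
    ∀ (xs vis nxt : List String),
      (List.foldl (fun v nb =>
        if scc.contains nb && !(List.contains v nb) && P n nb then PySem.Set.add v nb else v) vis xs) =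
      (reachInner scc P n vis nxt xs).1 := by
  intro xs
  induction xs with
  | nil => intro vis nxt; simp [reachInner]
  | cons nb rest ih =>
    intro vis nxt
    rw [List.foldl_cons]
    by_cases h : (scc.contains nb && !(List.contains vis nb) && P n nb) = true
    · have hv : vis.contains nb = false := by
        simp only [Bool.and_eq_true, Bool.not_eq_true'] at h
        exact h.1.2
      have hnm : nb ∉ vis := by simpa using hv
      have hadd : PySem.Set.add vis nb = vis ++ [nb] := by
        simp [PySem.Set.add, PySem.Set.contains, hnm]
      rw [if_pos h, hadd, reachInner, if_pos h]
      exact ih (vis ++ [nb]) (nxt ++ [nb])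
    · rw [if_neg h, reachInner, if_neg h]
      exact ih vis nxt

-- satRound is reachStep run over the whole visited snapshot.
theorem satRound_eq_reachStep (nbrs : PySem.Dict String (List String)) (scc : List String)
    (P : String → String → Bool) :
    ∀ (S vis nxt : List String),
      S.foldl (fun v n =>
        (PySem.Dict.getD nbrs n []).foldl (fun v nb =>
          if scc.contains nb && !(List.contains v nb) && P n nb then PySem.Set.add v nb else v) v) vis =
      (reachStep nbrs scc P vis nxt S).1 := by
  intro S
  induction S with
  | nil => intro vis nxt; simp [reachStep]
  | cons m S ih =>
    intro vis nxt
    simp only [List.foldl_cons, reachStep]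
    rw [reachInner_fst scc P m (PySem.Dict.getD nbrs m []) vis nxt]
    exact ih _ _

-- iterated rounds, the shape of B's fixed for-loop
def satIter (nbrs : PySem.Dict String (List String)) (scc : List String)
    (P : String → String → Bool) : Nat → List String → List String
  | 0, vis => vis
  | k + 1, vis => satIter nbrs scc P k (satRound nbrs scc P vis)

-- saturated node: all its admissible neighbours are already visited
def SatAt (nbrs : PySem.Dict String (List String)) (scc : List String)
    (P : String → String → Bool) (vis : List String) (n : String) : Prop :=
  ∀ nb ∈ PySem.Dict.getD nbrs n [], (scc.contains nb && P n nb) = true → nb ∈ vis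

theorem reachInner_noop (scc : List String) (P : String → String → Bool) (n : String) :
    ∀ (xs vis nxt : List String),
      (∀ nb ∈ xs, (scc.contains nb && P n nb) = true → nb ∈ vis) →
      reachInner scc P n vis nxt xs = (vis, nxt) := by
  intro xs
  induction xs with
  | nil => intro vis nxt _; simp [reachInner]
  | cons nb rest ih =>
    intro vis nxt hall
    have hng : ¬ (scc.contains nb && !vis.contains nb && P n nb) = true := by
      intro h
      simp only [Bool.and_eq_true, Bool.not_eq_true'] at h
      have hin := hall nb List.mem_cons_self (by
        simp only [Bool.and_eq_true]
        exact ⟨h.1.1, h.2⟩)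
      exact absurd hin (by simpa using h.1.2)
    rw [reachInner, if_neg hng]
    exact ih vis nxt (fun nb h => hall nb (List.mem_cons_of_mem _ h))

theorem reachStep_skip (nbrs : PySem.Dict String (List String)) (scc : List String)
    (P : String → String → Bool) :
    ∀ (S1 S2 vis nxt : List String), (∀ n ∈ S1, SatAt nbrs scc P vis n) →
      reachStep nbrs scc P vis nxt (S1 ++ S2) = reachStep nbrs scc P vis nxt S2 := by
  intro S1
  induction S1 with
  | nil => intro S2 vis nxt _; simp
  | cons m S1 ih =>
    intro S2 vis nxt hs
    have hm := hs m List.mem_cons_self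
    simp only [List.cons_append, reachStep]
    rw [reachInner_noop scc P m (PySem.Dict.getD nbrs m []) vis nxt hm]
    exact ih S2 vis nxt (fun n h => hs n (List.mem_cons_of_mem _ h))

theorem reachInner_covers (scc : List String) (P : String → String → Bool) (n : String) :
    ∀ (xs vis nxt : List String), ∀ nb ∈ xs, (scc.contains nb && P n nb) = true →
      nb ∈ (reachInner scc P n vis nxt xs).1 := by
  intro xs
  induction xs with
  | nil => intro vis nxt nb h; simp at h
  | cons x rest ih =>
    intro vis nxt nb hmem hcond
    by_cases h : (scc.contains x && !vis.contains x && P n x) = true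
    · simp only [reachInner, h, if_pos]
      rcases List.mem_cons.1 hmem with rfl | hm
      · obtain ⟨d, hfun, _⟩ := reachInner_exists scc P n rest (vis ++ [nb])
        rw [hfun (nxt ++ [nb])]
        simp
      · exact ih (vis ++ [x]) (nxt ++ [x]) nb hm hcond
    · simp only [reachInner, h, if_neg, Bool.false_eq_true, not_false_iff]
      rcases List.mem_cons.1 hmem with rfl | hm
      · have hv : nb ∈ vis := by
          cases hc : vis.contains nb
          · exfalso
            apply h
            simp only [Bool.and_eq_true] at hcond
            simp only [Bool.and_eq_true, Bool.not_eq_true']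
            exact ⟨⟨hcond.1, hc⟩, hcond.2⟩
          · simpa using hc
        obtain ⟨d, hfun, _⟩ := reachInner_exists scc P n rest vis
        rw [hfun nxt]
        exact List.mem_append.2 (Or.inl hv)
      · exact ih vis nxt nb hm hcond

theorem reachStep_covers (nbrs : PySem.Dict String (List String)) (scc : List String)
    (P : String → String → Bool) :
    ∀ (S vis nxt : List String), ∀ n ∈ S, SatAt nbrs scc P (reachStep nbrs scc P vis nxt S).1 n := by
  intro S
  induction S with
  | nil => intro vis nxt n h; simp at h
  | cons m S ih =>
    intro vis nxt n hmem
    simp only [reachStep]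
    rcases List.mem_cons.1 hmem with rfl | hm
    · intro nb hnb hcond
      have h1 : nb ∈ (reachInner scc P n vis nxt (PySem.Dict.getD nbrs n [])).1 :=
        reachInner_covers scc P n (PySem.Dict.getD nbrs n []) vis nxt nb hnb hcond
      obtain ⟨d2, hfun2, _⟩ := reachStep_exists nbrs scc P S
        (reachInner scc P n vis nxt (PySem.Dict.getD nbrs n [])).1
      rw [hfun2 (reachInner scc P n vis nxt (PySem.Dict.getD nbrs n [])).2]
      exact List.mem_append.2 (Or.inl h1)
    · exact ih _ _ n hm

theorem satIter_noop (nbrs : PySem.Dict String (List String)) (scc : List String)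
    (P : String → String → Bool) :
    ∀ (k : Nat) (vis : List String), (∀ n ∈ vis, SatAt nbrs scc P vis n) →
      satIter nbrs scc P k vis = vis := by
  intro k
  induction k with
  | zero => intro vis _; rfl
  | succ k ih =>
    intro vis hs
    have hskip := reachStep_skip nbrs scc P vis [] vis [] hs
    rw [List.append_nil] at hskip
    have hr : satRound nbrs scc P vis = vis := by
      unfold satRound
      rw [satRound_eq_reachStep nbrs scc P vis vis [], hskip]
      simp [reachStep]
    simp only [satIter, hr]
    exact ih vis hs

theorem satIter_eq_reachLoop (nbrs : PySem.Dict String (List String)) (scc : List String)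
    (P : String → String → Bool) :
    ∀ (k : Nat) (old fr : List String),
      (∀ n ∈ old, SatAt nbrs scc P (old ++ fr) n) →
      (scc.toFinset \ (old ++ fr).toFinset).card < k →
      satIter nbrs scc P k (old ++ fr) = reachLoop nbrs scc P (old ++ fr) fr := by
  intro k
  induction k with
  | zero => intro old fr _ hcard; exact absurd hcard (Nat.not_lt_zero _)
  | succ k ih =>
    intro old fr hsat hcard
    cases fr with
    | nil =>
      rw [reachLoop.eq_def]
      simp only [List.append_nil] at hsat ⊢
      exact satIter_noop nbrs scc P (k + 1) old hsat
    | cons n f =>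
      obtain ⟨d, hfun, hprop⟩ := reachStep_exists nbrs scc P (n :: f) (old ++ n :: f)
      have hround : satRound nbrs scc P (old ++ n :: f) = (old ++ n :: f) ++ d := by
        unfold satRound
        rw [satRound_eq_reachStep nbrs scc P (old ++ n :: f) (old ++ n :: f) []]
        rw [reachStep_skip nbrs scc P old (n :: f) (old ++ n :: f) [] hsat]
        rw [hfun []]
      have hloop : reachLoop nbrs scc P (old ++ n :: f) (n :: f) =
          reachLoop nbrs scc P ((old ++ n :: f) ++ d) d := by
        conv_lhs => rw [reachLoop.eq_def]
        simp only [hfun [], List.nil_append]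
      have hsat' : ∀ m ∈ (old ++ n :: f), SatAt nbrs scc P ((old ++ n :: f) ++ d) m := by
        intro m hm
        rcases List.mem_append.1 hm with hmo | hmf
        · intro nb hnb hc
          exact List.mem_append.2 (Or.inl (hsat m hmo nb hnb hc))
        · have hcov := reachStep_covers nbrs scc P (n :: f) (old ++ n :: f) [] m hmf
          intro nb hnb hc
          have := hcov nb hnb hc
          rw [hfun []] at this
          simpa using this
      cases d with
      | nil =>
        have hr : satRound nbrs scc P (old ++ n :: f) = old ++ n :: f := by
          simpa using hround
        simp only [satIter, hr]
        rw [satIter_noop nbrs scc P k (old ++ n :: f) (by simpa using hsat')]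
        rw [hloop]
        rw [reachLoop.eq_def]
        simp
      | cons x d' =>
        simp only [satIter, hround, hloop]
        apply ih (old ++ n :: f) (x :: d') hsat'
        have hx := hprop x List.mem_cons_self
        have h1 : (scc.toFinset \ ((old ++ n :: f) ++ x :: d').toFinset).card <
            (scc.toFinset \ (old ++ n :: f).toFinset).card := by
          apply Finset.card_lt_card
          constructor
          · intro y hy
            simp only [Finset.mem_sdiff, List.mem_toFinset, List.mem_append] at hy ⊢
            exact ⟨hy.1, fun h => hy.2 (Or.inl h)⟩
          · intro hsub
            have hxm : x ∈ scc.toFinset \ (old ++ n :: f).toFinset := by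
              simp only [Finset.mem_sdiff, List.mem_toFinset]
              exact ⟨hx.1, hx.2⟩
            have := hsub hxm
            simp [Finset.mem_sdiff] at this
        omega

theorem foldl_const_satIter (nbrs : PySem.Dict String (List String)) (scc : List String)
    (P : String → String → Bool) :
    ∀ (l : List Int) (vis : List String),
      l.foldl (fun vis _ => satRound nbrs scc P vis) vis = satIter nbrs scc P l.length vis := by
  intro l
  induction l with
  | nil => intro vis; rfl
  | cons a l ih => intro vis; simp only [List.foldl_cons, List.length_cons, satIter]; exact ih _

theorem saturate_eq_bfsA (nbrs : PySem.Dict String (List String)) (scc : List String)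
    (P : String → String → Bool) (s : String) :
    saturate nbrs scc P s = bfsA nbrs scc P [] [s] := by
  unfold saturate
  rw [foldl_const_satIter]
  have hlen : (PySem.List.pyRange 0 (PySem.List.len scc + 1) 1).length = scc.length + 1 := by
    simp [pysem]
  rw [hlen]
  have hcard : (scc.toFinset \ (([] : List String) ++ [s]).toFinset).card < scc.length + 1 := by
    have h1 : (scc.toFinset \ (([] : List String) ++ [s]).toFinset).card ≤ scc.toFinset.card :=
      Finset.card_le_card (Finset.sdiff_subset)
    have h2 := scc.toFinset_card_le
    omega
  have := satIter_eq_reachLoop nbrs scc P (scc.length + 1) [] [s] (by simp) hcard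
  simp only [List.nil_append] at this
  rw [this, ← bfsA_eq_reachLoop]

-- ===== VERDICT (by name: the statement is the Claim_ definition above) =====
theorem cycle_path_nodes_py_spec : Claim_equal_cycle_path_nodes_py := by
  intro entry exit_node scc adj rev_adj _
  unfold Spec_cycle_path_nodes_py cycle_path_nodes_py cycle_path_nodes_py_alt
  by_cases h : entry == exit_node
  · simp [h]
  · simp only [h, if_neg, Bool.false_eq_true, not_false_iff]
    rw [saturate_eq_bfsA (PySem.Dict.mk adj) scc _ entry]
    rw [saturate_eq_bfsA (PySem.Dict.mk rev_adj) scc _ exit_node]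
    rw [← bwd_pred_eq entry exit_node]
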